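-- pv_equiv track=rewrite | github.com/muneebaifrah/Unstop-100-Days-Coding-Sprint | Day-43/2.New_Shelf.py | calculate_inverse_of_lis_length
-- ===== SOURCE A (Python) =====
-- def calculate_inverse_of_lis_length(n, heights):
--     MOD = 1000007  # 10^6 + 7
--     from bisect import bisect_left
--
--     # Compute the length of the longest strictly increasing subsequence (LIS)
--     dp = []
--     for h in heights:
--         pos = bisect_left(dp, h)
--         if pos == len(dp):
--             dp.append(h)
--         else:
--             dp[pos] = h
--     lis_length = len(dp)
--
--     # Compute the modular inverse of lis_length modulo MOD using the Extended Euclidean Algorithm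
--     inverse = modInverse(lis_length, MOD)
--     return inverse
--
-- def extended_gcd(a, b):
--     if a == 0:
--         return b, 0, 1
--     gcd, x1, y1 = extended_gcd(b % a, a)
--     x = y1 - (b // a) * x1
--     y = x1
--     return gcd, x, y
--
-- def modInverse(a, m):
--     gcd, x, _ = extended_gcd(a, m)
--     if gcd != 1:
--         raise Exception("Inverse does not exist")
--     else:
--         return x % m
-- ===== SOURCE B (Python) =====
-- # B: classic quadratic LIS dynamic program (best length ending at each element)
-- # instead of A's patience-sorting/bisect tails array; modInverse/extended_gcd kept
-- # verbatim so the exception behaviour is identical.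
--
-- def calculate_inverse_of_lis_length(n, heights):
--     MOD = 1000007  # 10^6 + 7
--     # q holds (height, length of the longest strictly increasing subsequence ending there)
--     q = []
--     for h in heights:
--         q.append((h, 1 + max([l for v, l in q if v < h], default=0)))
--     lis_length = max([l for _, l in q], default=0)
--     return modInverse(lis_length, MOD)
--
-- def extended_gcd(a, b):
--     if a == 0:
--         return b, 0, 1
--     gcd, x1, y1 = extended_gcd(b % a, a)
--     x = y1 - (b // a) * x1
--     y = x1
--     return gcd, x, y
--
-- def modInverse(a, m):
--     gcd, x, _ = extended_gcd(a, m)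
--     if gcd != 1:
--         raise Exception("Inverse does not exist")
--     else:
--         return x % m
-- ===== Notes on version B (the rewrite author's own statement) =====
-- stated objective: simpler
-- what changed: Replaces A's patience-sorting LIS (bisect insertion into a tails array) with the classic quadratic dynamic program that records, for each element, the length of the longest strictly increasing subsequence ending there, and takes the maximum; the extended-Euclid modular-inverse helpers are kept verbatim so both programs return and raise identically.
import Mathlib
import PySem

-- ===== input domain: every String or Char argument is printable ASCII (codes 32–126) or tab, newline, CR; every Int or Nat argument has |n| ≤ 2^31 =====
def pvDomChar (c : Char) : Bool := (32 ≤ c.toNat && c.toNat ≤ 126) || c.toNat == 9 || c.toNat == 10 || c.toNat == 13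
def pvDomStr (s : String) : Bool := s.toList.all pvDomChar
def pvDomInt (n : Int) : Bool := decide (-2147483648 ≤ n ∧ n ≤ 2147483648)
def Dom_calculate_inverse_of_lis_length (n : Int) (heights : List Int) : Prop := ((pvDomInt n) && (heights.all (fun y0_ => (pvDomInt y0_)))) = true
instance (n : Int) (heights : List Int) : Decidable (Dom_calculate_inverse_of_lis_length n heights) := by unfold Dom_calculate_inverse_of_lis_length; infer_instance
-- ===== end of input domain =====

-- B replaces A's patience-sorting (bisect) LIS computation with the classic quadratic
-- "best length ending at each element" dynamic program; the modular-inverse helpers are kept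
-- verbatim, so the two programs return (and raise) identically. Objective: simpler.

-- ===== PORT A =====
-- helper for termination of extended_gcd (Python recursion on b % a, |b % a| < |a| for a ≠ 0)
theorem pv_mod_natAbs_lt (b : Int) {a : Int} (ha : a ≠ 0) :
    (PySem.Int.mod b a).natAbs < a.natAbs := by
  rcases lt_or_gt_of_ne ha with h | h
  · have := PySem.Int.mod_neg_bounds b h; omega
  · have h1 := PySem.Int.mod_nonneg b h; have h2 := PySem.Int.mod_lt b h; omega

-- extended_gcd: literal port; '%' and '//' are Python floor semantics (PySem.Int.mod/floordiv)
def extended_gcd (a b : Int) : Int × Int × Int :=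
  if ha : a = 0 then (b, 0, 1)
  else
    let r := extended_gcd (PySem.Int.mod b a) a
    (r.1, r.2.2 - PySem.Int.floordiv b a * r.2.1, r.2.1)
termination_by a.natAbs
decreasing_by exact pv_mod_natAbs_lt b ha

-- modInverse: where Python raises Exception("Inverse does not exist") the port returns 0;
-- those inputs are exactly the ones Pre_ excludes
def modInverse (a m : Int) : Int :=
  let r := extended_gcd a m
  if r.1 ≠ 1 then 0
  else PySem.Int.mod r.2.1 m

-- one iteration of A's patience loop: bisect_left, then append or replace
def pvAStep (dp : List Int) (h : Int) : List Int :=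
  let pos := PySem.List.bisectLeft dp h
  if pos = dp.length then dp ++ [h] else dp.set pos h

def calculate_inverse_of_lis_length (n : Int) (heights : List Int) : Int :=
  let dp := heights.foldl pvAStep []
  modInverse (dp.length : Int) 1000007

-- ===== PORT B =====
-- one iteration of B's DP loop: append (h, 1 + max best over earlier smaller heights)
def pvBStep (q : List (Int × Int)) (h : Int) : List (Int × Int) :=
  q ++ [(h, 1 + PySem.List.maxD ((q.filter (fun p => p.1 < h)).map Prod.snd) (fun l => l) 0)]

def calculate_inverse_of_lis_length_alt (n : Int) (heights : List Int) : Int :=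
  let q := heights.foldl pvBStep []
  modInverse (PySem.List.maxD (q.map Prod.snd) (fun l => l) 0) 1000007

-- ===== PRECONDITION & SPEC =====
-- reference suffix recursion for the LIS length (used only to state Pre_; neither port computes it this way):
-- pvLisTails xs pairs each element with the length of the longest strictly increasing subsequence starting there
def pvLisTails : List Int → List (Int × Int)
  | [] => []
  | h :: t =>
      let r := pvLisTails t
      (h, 1 + (((r.filter (fun p => h < p.1)).map Prod.snd).foldr max 0)) :: r

-- Pre_ excludes exactly the inputs on which the Python (both A and B, which share modInverse)
-- raises Exception("Inverse does not exist"): LIS length 0 (empty heights) or LIS length sharing a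
-- factor with 1000007 = 29 * 34483. The equality proof below does not need this hypothesis (the two
-- ports agree even on the raise branch, where both return modInverse's placeholder 0); Pre_ is there
-- only because the Python programs raise rather than return on those inputs.
def Pre_calculate_inverse_of_lis_length (n : Int) (heights : List Int) : Prop :=
  Int.gcd (((pvLisTails heights).map Prod.snd).foldr max 0) 1000007 = 1
instance (n : Int) (heights : List Int) : Decidable (Pre_calculate_inverse_of_lis_length n heights) := by unfold Pre_calculate_inverse_of_lis_length; infer_instance

def pvWitness_calculate_inverse_of_lis_length : Int × List Int := (0, [1, 2])

def Spec_calculate_inverse_of_lis_length (n : Int) (heights : List Int) (out : Int) : Prop := out = calculate_inverse_of_lis_length_alt n heights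
instance (n : Int) (heights : List Int) (out : Int) : Decidable (Spec_calculate_inverse_of_lis_length n heights out) := by unfold Spec_calculate_inverse_of_lis_length; infer_instance

-- ===== CLAIM (what is proved, stated in full; the proofs are below) =====
def Claim_equal_calculate_inverse_of_lis_length : Prop := ∀ (n : Int) (heights : List Int), Dom_calculate_inverse_of_lis_length n heights → Pre_calculate_inverse_of_lis_length n heights → Spec_calculate_inverse_of_lis_length n heights (calculate_inverse_of_lis_length n heights)

-- ===== LEMMAS AND PROOFS =====

-- max(L, default=0) for an Int list: upper bound and attainment
theorem pv_maxD_spec (L : List Int) :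
    (∀ x ∈ L, x ≤ PySem.List.maxD L (fun l => l) 0) ∧
    (PySem.List.maxD L (fun l => l) 0 = 0 ∨ PySem.List.maxD L (fun l => l) 0 ∈ L) := by
  cases hm : PySem.List.max? L (fun l => l) with
  | none =>
      have hL := (PySem.List.max?_eq_none_iff L _).1 hm
      subst hL; simp [PySem.List.maxD, hm]
  | some m =>
      refine ⟨fun x hx => ?_, Or.inr ?_⟩
      · simpa [PySem.List.maxD, hm] using PySem.List.max?_isMax hm x hx
      · simpa [PySem.List.maxD, hm] using PySem.List.max?_mem hm

-- The invariant tying A's tails array dp to B's DP table q (built over the same processed prefix):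
-- dp is strictly increasing, every best value in q lies in [1, dp.length], and dp[k] is the minimum
-- height in q whose best value is at least k+1 (attained at best value exactly k+1).
def pvInv (dp : List Int) (q : List (Int × Int)) : Prop :=
  (∀ i j (hi : i < dp.length) (hj : j < dp.length), i < j → dp[i] < dp[j]) ∧
  (∀ p ∈ q, 1 ≤ p.2 ∧ p.2 ≤ (dp.length : Int)) ∧
  (∀ k (hk : k < dp.length),
     (∃ p ∈ q, p.2 = (k : Int) + 1 ∧ p.1 = dp[k]) ∧
     (∀ p ∈ q, (k : Int) + 1 ≤ p.2 → dp[k] ≤ p.1))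

theorem pv_inv_step (dp : List Int) (q : List (Int × Int)) (h : Int) (hI : pvInv dp q) :
    pvInv (pvAStep dp h) (pvBStep q h) := by
  obtain ⟨hs, hb, hm⟩ := hI
  have pw : List.Pairwise (fun x1 x2 => x1 ≤ x2) dp :=
    List.pairwise_iff_getElem.mpr (fun i j hi hj hij => le_of_lt (hs i j hi hj hij))
  obtain ⟨hposle, hlt, hge⟩ := PySem.List.bisectLeft_spec dp h pw
  set pos := PySem.List.bisectLeft dp h with hposdef
  -- the DP's "max best over earlier smaller heights" equals bisect's insertion point
  obtain ⟨hub, hcase⟩ := pv_maxD_spec ((q.filter (fun p => p.1 < h)).map Prod.snd)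
  set g := PySem.List.maxD ((q.filter (fun p => p.1 < h)).map Prod.snd) (fun l => l) 0 with hgdef
  have hg : g = (pos : Int) := by
    have hle : g ≤ (pos : Int) := by
      rcases hcase with h0 | hmem
      · omega
      · obtain ⟨p, hpf, hpg⟩ := List.mem_map.1 hmem
        obtain ⟨hpq, hph⟩ := List.mem_filter.1 hpf
        have hph' : p.1 < h := by simpa using hph
        by_contra hcon
        have hposlt : pos < dp.length := by
          have := (hb p hpq).2; omega
        have h1 : dp[pos] ≤ p.1 := (hm pos hposlt).2 p hpq (by omega)
        have h2 : h ≤ dp[pos] := hge pos hposlt le_rfl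
        omega
    have hge' : (pos : Int) ≤ g := by
      rcases Nat.eq_zero_or_pos pos with h0 | hpos0
      · rcases hcase with h0' | hmem
        · omega
        · obtain ⟨p, hpf, hpg⟩ := List.mem_map.1 hmem
          have := (hb p (List.mem_filter.1 hpf).1).1; omega
      · have hklt : pos - 1 < dp.length := by omega
        obtain ⟨p, hpq, hp2, hp1⟩ := (hm (pos - 1) hklt).1
        have hdph : dp[pos - 1] < h := hlt (pos - 1) hklt (by omega)
        have hpf : p ∈ q.filter (fun p => p.1 < h) :=
          List.mem_filter.2 ⟨hpq, by simpa [hp1] using hdph⟩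
        have : p.2 ≤ g := hub p.2 (List.mem_map.2 ⟨p, hpf, rfl⟩)
        omega
    omega
  by_cases hc : pos = dp.length
  · -- append case: dp gains h at the end, q gains (h, pos + 1)
    have hA : pvAStep dp h = dp ++ [h] := by simp [pvAStep, ← hposdef, hc]
    have hB : pvBStep q h = q ++ [(h, 1 + g)] := by simp [pvBStep, ← hgdef]
    rw [hA, hB]
    refine ⟨?_, ?_, ?_⟩
    · intro i j hi hj hij
      have hi' : i < dp.length + 1 := by simpa using hi
      have hj' : j < dp.length + 1 := by simpa using hj
      rcases Nat.lt_or_ge j dp.length with hjl | hjge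
      · rw [List.getElem_append_left (by omega), List.getElem_append_left hjl]
        exact hs i j (by omega) hjl hij
      · have hje : j = dp.length := by omega
        subst hje
        rw [List.getElem_append_left (by omega), List.getElem_append_right le_rfl]
        simpa using hlt i (by omega) (by omega)
    · intro p hp
      simp only [List.length_append, List.length_cons, List.length_nil]
      rcases List.mem_append.1 hp with hpq | hpn
      · have := hb p hpq; push_cast; omega
      · simp only [List.mem_cons, List.not_mem_nil, or_false] at hpn
        subst hpn
        show 1 ≤ 1 + g ∧ 1 + g ≤ ((dp.length + 1 : Nat) : Int)
        rw [hg, hc]; push_cast; omega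
    · intro k hk
      have hk' : k < dp.length + 1 := by simpa using hk
      rcases Nat.lt_or_ge k dp.length with hkl | hkge
      · constructor
        · obtain ⟨p, hpq, hp2, hp1⟩ := (hm k hkl).1
          refine ⟨p, List.mem_append.2 (Or.inl hpq), hp2, ?_⟩
          rw [List.getElem_append_left hkl]; exact hp1
        · intro p hp hple
          rw [List.getElem_append_left hkl]
          rcases List.mem_append.1 hp with hpq | hpn
          · exact (hm k hkl).2 p hpq hple
          · simp only [List.mem_cons, List.not_mem_nil, or_false] at hpn
            subst hpn
            have hkpos : k < pos := by
              have h2 : (k : Int) + 1 ≤ 1 + g := hple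
              rw [hg] at h2; omega
            exact le_of_lt (hlt k hkl hkpos)
      · have hke : k = dp.length := by omega
        subst hke
        constructor
        · refine ⟨(h, 1 + g), List.mem_append.2 (Or.inr (by simp)), ?_, ?_⟩
          · show 1 + g = (dp.length : Int) + 1
            rw [hg, hc]; ring
          · show h = _
            rw [List.getElem_append_right le_rfl]; simp
        · intro p hp hple
          rw [List.getElem_append_right le_rfl]
          rcases List.mem_append.1 hp with hpq | hpn
          · exfalso; have := (hb p hpq).2; omega
          · simp only [List.mem_cons, List.not_mem_nil, or_false] at hpn
            subst hpn; simp
  · -- replace case: dp[pos] is lowered to h, q gains (h, pos + 1)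
    have hposlt : pos < dp.length := lt_of_le_of_ne hposle hc
    have hA : pvAStep dp h = dp.set pos h := by simp [pvAStep, ← hposdef, hc]
    have hB : pvBStep q h = q ++ [(h, 1 + g)] := by simp [pvBStep, ← hgdef]
    rw [hA, hB]
    refine ⟨?_, ?_, ?_⟩
    · intro i j hi hj hij
      have hi' : i < dp.length := by simpa using hi
      have hj' : j < dp.length := by simpa using hj
      rcases eq_or_ne pos i with h1 | h1 <;> rcases eq_or_ne pos j with h2 | h2
      · exact absurd hij (by omega)
      · subst h1
        rw [List.getElem_set, if_pos rfl, List.getElem_set, if_neg h2]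
        exact lt_of_le_of_lt (hge pos hposlt le_rfl) (hs pos j hposlt hj' hij)
      · subst h2
        rw [List.getElem_set, if_neg h1, List.getElem_set, if_pos rfl]
        exact hlt i hi' hij
      · rw [List.getElem_set, if_neg h1, List.getElem_set, if_neg h2]
        exact hs i j hi' hj' hij
    · intro p hp
      simp only [List.length_set]
      rcases List.mem_append.1 hp with hpq | hpn
      · exact hb p hpq
      · simp only [List.mem_cons, List.not_mem_nil, or_false] at hpn
        subst hpn
        show 1 ≤ 1 + g ∧ 1 + g ≤ (dp.length : Int)
        rw [hg]; omega
    · intro k hk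
      have hk' : k < dp.length := by simpa using hk
      by_cases hkp : k = pos
      · subst hkp
        constructor
        · refine ⟨(h, 1 + g), List.mem_append.2 (Or.inr (by simp)), ?_, ?_⟩
          · show 1 + g = (pos : Int) + 1
            rw [hg]; ring
          · show h = _
            rw [List.getElem_set, if_pos rfl]
        · intro p hp hple
          rw [List.getElem_set, if_pos rfl]
          rcases List.mem_append.1 hp with hpq | hpn
          · exact le_trans (hge pos hk' le_rfl) ((hm pos hk').2 p hpq hple)
          · simp only [List.mem_cons, List.not_mem_nil, or_false] at hpn
            subst hpn; simp
      · constructor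
        · obtain ⟨p, hpq, hp2, hp1⟩ := (hm k hk').1
          refine ⟨p, List.mem_append.2 (Or.inl hpq), hp2, ?_⟩
          rw [List.getElem_set, if_neg (Ne.symm hkp)]; exact hp1
        · intro p hp hple
          rw [List.getElem_set, if_neg (Ne.symm hkp)]
          rcases List.mem_append.1 hp with hpq | hpn
          · exact (hm k hk').2 p hpq hple
          · simp only [List.mem_cons, List.not_mem_nil, or_false] at hpn
            subst hpn
            have hkpos : k < pos := by
              have h2 : (k : Int) + 1 ≤ 1 + g := hple
              rw [hg] at h2; omega
            exact le_of_lt (hlt k hk' hkpos)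

theorem pv_inv_fold (xs : List Int) (dp : List Int) (q : List (Int × Int)) (hI : pvInv dp q) :
    pvInv (xs.foldl pvAStep dp) (xs.foldl pvBStep q) := by
  induction xs generalizing dp q with
  | nil => exact hI
  | cons h t ih => exact ih _ _ (pv_inv_step dp q h hI)

theorem pv_inv_nil : pvInv [] [] :=
  ⟨fun i j hi _ _ => by simp at hi, fun p hp => by simp at hp, fun k hk => by simp at hk⟩

theorem pv_inv_final (dp : List Int) (q : List (Int × Int)) (hI : pvInv dp q) :
    PySem.List.maxD (q.map Prod.snd) (fun l => l) 0 = (dp.length : Int) := by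
  obtain ⟨_, hb, hm⟩ := hI
  obtain ⟨hub, hcase⟩ := pv_maxD_spec (q.map Prod.snd)
  set M := PySem.List.maxD (q.map Prod.snd) (fun l => l) 0 with hMdef
  have hMle : M ≤ (dp.length : Int) := by
    rcases hcase with h0 | hmem
    · omega
    · obtain ⟨p, hpq, hpM⟩ := List.mem_map.1 hmem
      have := (hb p hpq).2; omega
  have hleM : (dp.length : Int) ≤ M := by
    rcases Nat.eq_zero_or_pos dp.length with h0 | hposl
    · rcases hcase with h0' | hmem
      · omega
      · obtain ⟨p, hpq, hpM⟩ := List.mem_map.1 hmem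
        have := (hb p hpq).1; omega
    · have hklt : dp.length - 1 < dp.length := by omega
      obtain ⟨p, hpq, hp2, _⟩ := (hm (dp.length - 1) hklt).1
      have : p.2 ≤ M := hub p.2 (List.mem_map.2 ⟨p, hpq, rfl⟩)
      omega
  omega

-- ===== VERDICT (by name: the statement is the Claim_ definition above) =====
theorem calculate_inverse_of_lis_length_spec : Claim_equal_calculate_inverse_of_lis_length := by
  intro n heights _ _
  unfold Spec_calculate_inverse_of_lis_length
  simp only [calculate_inverse_of_lis_length, calculate_inverse_of_lis_length_alt]
  rw [pv_inv_final (heights.foldl pvAStep []) (heights.foldl pvBStep [])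
        (pv_inv_fold heights [] [] pv_inv_nil)]
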